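-- pv_equiv track=rewrite | github.com/ripamonti-daniele/Codice_Fiscale_G3 | funzioni.py | calcolaCodiceNome
-- ===== SOURCE A (Python) =====
-- def calcolaCodiceNome(nome):
--     consonanti = "bcdfghjklmnpqrstvwxyzBCDFGHJKLMNPQRSTVWXYZ"
--     vocali = "aeiouAEIOU"
--
--     risultato = ""
--     count = 0
--
--     for c in nome:
--         if c in consonanti:
--             risultato += c
--             count += 1
--         if count == 3:
--             return risultato
--
--     for c in nome:
--         if c in vocali:
--             risultato += c
--             count += 1
--         if count == 3:
--             return risultato
--
--     return risultato
-- ===== SOURCE B (Python) =====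
-- def calcolaCodiceNome(nome):
--     consonanti = "bcdfghjklmnpqrstvwxyzBCDFGHJKLMNPQRSTVWXYZ"
--     vocali = "aeiouAEIOU"
--     letters = [c for c in nome if c in consonanti or c in vocali]
--     letters.sort(key=lambda c: c in vocali)  # stable: consonants keep order, then vowels
--     return "".join(letters[:3])
-- ===== Notes on version B (the rewrite author's own statement) =====
-- stated objective: alternative
-- what changed: Replaces A's two staged scans with a counter and early returns by classify-and-stable-sort: keep only letters, stable-sort them by class (consonant before vowel), and slice the first three.
import Mathlib
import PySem

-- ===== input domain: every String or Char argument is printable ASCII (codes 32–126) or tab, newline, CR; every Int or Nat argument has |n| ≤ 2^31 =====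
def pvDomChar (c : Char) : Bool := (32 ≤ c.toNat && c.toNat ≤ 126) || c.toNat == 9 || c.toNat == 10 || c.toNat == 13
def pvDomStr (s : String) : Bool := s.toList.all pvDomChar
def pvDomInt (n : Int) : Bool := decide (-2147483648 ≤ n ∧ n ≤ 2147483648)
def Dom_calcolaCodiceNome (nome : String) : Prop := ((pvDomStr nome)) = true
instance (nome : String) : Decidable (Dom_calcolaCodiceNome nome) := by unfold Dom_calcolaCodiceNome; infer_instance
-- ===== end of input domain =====

-- B replaces A's two staged counter/early-return scans by classify-and-stable-sort (filter letters,
-- stable sort by class with consonants first, take 3); an alternative algorithm of similar cost.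


-- ===== PORT A =====
def pvConsonantiA : List Char := "bcdfghjklmnpqrstvwxyzBCDFGHJKLMNPQRSTVWXYZ".toList
def pvVocaliA : List Char := "aeiouAEIOU".toList

-- one of A's two loops: accumulator risultato (as List Char) and count; `.error` models the
-- early `return risultato`, `.ok` the fall-through with the final state
def pvLoopA (S : List Char) : List Char → List Char → Nat → Except (List Char) (List Char × Nat)
  | [], ris, count => .ok (ris, count)
  | c :: cs, ris, count =>
    let ris' := if c ∈ S then ris ++ [c] else ris
    let count' := if c ∈ S then count + 1 else count
    if count' = 3 then .error ris' else pvLoopA S cs ris' count'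

def calcolaCodiceNome (nome : String) : String :=
  match pvLoopA pvConsonantiA nome.toList [] 0 with
  | .error r => String.ofList r
  | .ok (r, count) =>
    match pvLoopA pvVocaliA nome.toList r count with
    | .error r2 => String.ofList r2
    | .ok (r2, _) => String.ofList r2

-- ===== PORT B =====
def pvConsonantiB : List Char := "bcdfghjklmnpqrstvwxyzBCDFGHJKLMNPQRSTVWXYZ".toList
def pvVocaliB : List Char := "aeiouAEIOU".toList

-- Source B: filter to letters, stable sort by class (False/0 = consonant, True/1 = vowel), take 3
def calcolaCodiceNome_alt (nome : String) : String :=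
  let letters := nome.toList.filter (fun c => c ∈ pvConsonantiB ∨ c ∈ pvVocaliB)
  let ordered := PySem.List.sorted letters (fun c => if c ∈ pvVocaliB then (1 : Nat) else 0)
  String.ofList (ordered.take 3)

-- ===== PRECONDITION & SPEC =====
def Spec_calcolaCodiceNome (nome : String) (out : String) : Prop := out = calcolaCodiceNome_alt nome
instance (nome : String) (out : String) : Decidable (Spec_calcolaCodiceNome nome out) := by unfold Spec_calcolaCodiceNome; infer_instance

-- ===== CLAIM (what is proved, stated in full; the proofs are below) =====
def Claim_equal_calcolaCodiceNome : Prop := ∀ (nome : String), Dom_calcolaCodiceNome nome → Spec_calcolaCodiceNome nome (calcolaCodiceNome nome)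

-- ===== LEMMAS AND PROOFS =====

-- characterisation of one pass of A's loop, starting from a state with count = ris.length < 3
theorem pvLoopA_spec (S : List Char) (l : List Char) : ∀ (ris : List Char), ris.length < 3 →
    pvLoopA S l ris ris.length =
      if 3 ≤ (ris ++ l.filter (fun c => c ∈ S)).length
      then .error ((ris ++ l.filter (fun c => c ∈ S)).take 3)
      else .ok (ris ++ l.filter (fun c => c ∈ S), (ris ++ l.filter (fun c => c ∈ S)).length) := by
  induction l with
  | nil =>
    intro ris h
    simp [pvLoopA]
    omega
  | cons c cs ih =>
    intro ris h
    by_cases hc : c ∈ S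
    · have hstep : ∀ k, pvLoopA S (c :: cs) ris k =
          if k + 1 = 3 then .error (ris ++ [c]) else pvLoopA S cs (ris ++ [c]) (k + 1) := by
        intro k; simp [pvLoopA, hc]
      rw [hstep]
      simp only [List.filter_cons, hc, decide_true, if_true]
      have hsplit : ris ++ c :: List.filter (fun c => decide (c ∈ S)) cs
          = (ris ++ [c]) ++ List.filter (fun c => decide (c ∈ S)) cs := by simp
      rw [hsplit]
      by_cases h3 : ris.length + 1 = 3
      · have hge : 3 ≤ (ris ++ [c] ++ List.filter (fun c => decide (c ∈ S)) cs).length := by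
          simp; omega
        rw [if_pos h3, if_pos hge]
        rw [show (3 : ℕ) = (ris ++ [c]).length by simp; omega, List.take_left]
      · have h' : (ris ++ [c]).length < 3 := by simp; omega
        have hih := ih (ris ++ [c]) h'
        rw [show ris.length + 1 = (ris ++ [c]).length by simp] at *
        rw [if_neg h3, hih]
    · have h3 : ¬ (ris.length = 3) := by omega
      simp [pvLoopA, hc, h3, ih ris h]

-- inserting an element of key 0 into "zeros ++ ones" lands at the end of the zeros
theorem pv_insertBy_zero {α : Type} (key : α → Nat) (x : α) (hx : key x = 0) :
    ∀ (A0 A1 : List α), (∀ c ∈ A0, key c = 0) → (∀ c ∈ A1, key c = 1) →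
    PySem.List.insertBy (fun a b => decide (key a < key b)) x (A0 ++ A1) = A0 ++ x :: A1 := by
  intro A0
  induction A0 with
  | nil =>
    intro A1 _ h1
    cases A1 with
    | nil => simp [PySem.List.insertBy]
    | cons y ys =>
      have hy : key y = 1 := h1 y (by simp)
      simp [PySem.List.insertBy, hx, hy]
  | cons a A0 ih =>
    intro A1 h0 h1
    have ha : key a = 0 := h0 a (by simp)
    simp only [List.cons_append, PySem.List.insertBy, hx, ha]
    simp only [decide_eq_true_eq]
    rw [if_neg (by omega)]
    rw [ih A1 (fun c hc => h0 c (by simp [hc])) h1]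

-- inserting an element of key 1 into a list with keys ≤ 1 lands at the very end
theorem pv_insertBy_one {α : Type} (key : α → Nat) (x : α) (hx : key x = 1) :
    ∀ (L : List α), (∀ c ∈ L, key c ≤ 1) →
    PySem.List.insertBy (fun a b => decide (key a < key b)) x L = L ++ [x] := by
  intro L
  induction L with
  | nil => intro _; simp [PySem.List.insertBy]
  | cons y ys ih =>
    intro h
    have hy : key y ≤ 1 := h y (by simp)
    simp only [PySem.List.insertBy, hx, decide_eq_true_eq]
    rw [if_neg (by omega)]
    rw [ih (fun c hc => h c (by simp [hc]))]
    simp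

-- the insertion-sort fold with a {0,1}-valued key is "key-0 elements in order, then key-1 elements"
theorem pv_foldl_sort {α : Type} (key : α → Nat) (hk : ∀ c, key c ≤ 1) :
    ∀ (xs A0 A1 : List α), (∀ c ∈ A0, key c = 0) → (∀ c ∈ A1, key c = 1) →
    xs.foldl (fun acc x => PySem.List.insertBy (fun a b => decide (key a < key b)) x acc) (A0 ++ A1)
      = (A0 ++ xs.filter (fun c => key c = 0)) ++ (A1 ++ xs.filter (fun c => key c = 1)) := by
  intro xs
  induction xs with
  | nil => intro A0 A1 _ _; simp
  | cons x xs ih =>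
    intro A0 A1 h0 h1
    by_cases hx : key x = 0
    · have hins := pv_insertBy_zero key x hx A0 A1 h0 h1
      simp only [List.foldl_cons, hins]
      have : A0 ++ x :: A1 = (A0 ++ [x]) ++ A1 := by simp
      rw [this, ih (A0 ++ [x]) A1
        (by intro c hc; rcases List.mem_append.mp hc with h | h
            · exact h0 c h
            · simp at h; subst h; exact hx) h1]
      simp [hx]
    · have hx1 : key x = 1 := by have := hk x; omega
      have hle : ∀ c ∈ A0 ++ A1, key c ≤ 1 := by
        intro c hc; rcases List.mem_append.mp hc with h | h
        · exact le_of_eq (by rw [h0 c h]) |>.trans (by omega)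
        · exact le_of_eq (h1 c h)
      have hins := pv_insertBy_one key x hx1 (A0 ++ A1) hle
      simp only [List.foldl_cons, hins]
      have : A0 ++ A1 ++ [x] = A0 ++ (A1 ++ [x]) := by simp
      rw [this, ih A0 (A1 ++ [x]) h0
        (by intro c hc; rcases List.mem_append.mp hc with h | h
            · exact h1 c h
            · simp at h; subst h; exact hx1)]
      simp [hx1]

-- consonant and vowel alphabets are disjoint
theorem pv_disjoint_bool : pvConsonantiB.all (fun c => !(pvVocaliB.contains c)) = true := by rfl

theorem pv_disjoint : ∀ c ∈ pvConsonantiB, c ∉ pvVocaliB := by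
  have h := pv_disjoint_bool
  simp [List.all_eq_true] at h
  exact h

-- pointwise: "letter with class 0" is exactly "consonant"
theorem pv_pred_zero (c : Char) :
    ((decide ((if c ∈ pvVocaliB then (1 : Nat) else 0) = 0)) &&
      (decide (c ∈ pvConsonantiB ∨ c ∈ pvVocaliB))) = decide (c ∈ pvConsonantiB) := by
  by_cases hv : c ∈ pvVocaliB
  · by_cases hc : c ∈ pvConsonantiB
    · exact absurd hv (pv_disjoint c hc)
    · simp [hv, hc]
  · by_cases hc : c ∈ pvConsonantiB <;> simp [hv, hc]

-- pointwise: "letter with class 1" is exactly "vowel"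
theorem pv_pred_one (c : Char) :
    ((decide ((if c ∈ pvVocaliB then (1 : Nat) else 0) = 1)) &&
      (decide (c ∈ pvConsonantiB ∨ c ∈ pvVocaliB))) = decide (c ∈ pvVocaliB) := by
  by_cases hv : c ∈ pvVocaliB <;> simp [hv]

-- B's sorted letter list is "consonants of nome in order, then vowels of nome in order"
theorem pv_sorted_split (l : List Char) :
    PySem.List.sorted (l.filter (fun c => c ∈ pvConsonantiB ∨ c ∈ pvVocaliB))
        (fun c => if c ∈ pvVocaliB then (1 : Nat) else 0)
      = l.filter (fun c => c ∈ pvConsonantiB) ++ l.filter (fun c => c ∈ pvVocaliB) := by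
  unfold PySem.List.sorted
  simp only [if_neg (by simp : ¬ (false = true))]
  have h := pv_foldl_sort (fun c => if c ∈ pvVocaliB then (1 : Nat) else 0)
      (by intro c; by_cases h : c ∈ pvVocaliB <;> simp [h])
      (l.filter (fun c => c ∈ pvConsonantiB ∨ c ∈ pvVocaliB)) [] []
      (by simp) (by simp)
  simp only [List.nil_append, List.append_nil] at h
  rw [h, List.filter_filter, List.filter_filter]
  rw [List.filter_congr (fun c _ => pv_pred_zero c), List.filter_congr (fun c _ => pv_pred_one c)]

-- ===== VERDICT (by name: the statement is the Claim_ definition above) =====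
theorem calcolaCodiceNome_spec : Claim_equal_calcolaCodiceNome := by
  intro nome _
  unfold Spec_calcolaCodiceNome calcolaCodiceNome calcolaCodiceNome_alt
  rw [show pvConsonantiA = pvConsonantiB by decide, show pvVocaliA = pvVocaliB by decide]
  simp only [pv_sorted_split nome.toList]
  set F := nome.toList.filter (fun c => c ∈ pvConsonantiB) with hF
  set V := nome.toList.filter (fun c => c ∈ pvVocaliB) with hV
  have h1 := pvLoopA_spec pvConsonantiB nome.toList [] (by simp)
  simp only [List.length_nil, List.nil_append, ← hF] at h1
  rw [h1]
  by_cases hf : 3 ≤ F.length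
  · rw [if_pos hf]
    simp only
    rw [List.take_append, show 3 - F.length = 0 by omega]
    simp
  · rw [if_neg hf]
    simp only
    have h2 := pvLoopA_spec pvVocaliB nome.toList F (by omega)
    simp only [← hV] at h2
    rw [h2]
    by_cases hfv : 3 ≤ (F ++ V).length
    · rw [if_pos hfv]
    · rw [if_neg hfv]
      simp only
      rw [List.take_of_length_le (by omega)]
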